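-- pv_equiv track=rewrite | github.com/databricks-industry-solutions/dbxmetagen | src/dbxmetagen/ddl_bundle_utils.py | rewrite_ddl_catalog_schema
-- ===== SOURCE A (Python) =====
-- def rewrite_ddl_catalog_schema(
--     stmts: list[str],
--     source_catalog: str,
--     source_schema: str,
--     target_catalog: str,
--     target_schema: str,
-- ) -> list[str]:
--     """Rewrite catalog.schema references in DDL, skipping single-quoted string literals."""
--     if source_catalog == target_catalog and source_schema == target_schema:
--         return stmts
--     old_prefix = f"`{source_catalog}`.`{source_schema}`"
--     new_prefix = f"`{target_catalog}`.`{target_schema}`"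
--     old_bare = f"{source_catalog}.{source_schema}"
--     new_bare = f"{target_catalog}.{target_schema}"
--     result = []
--     for s in stmts:
--         parts = s.split("'")
--         for i in range(0, len(parts), 2):  # even indices are outside quotes
--             parts[i] = parts[i].replace(old_prefix, new_prefix).replace(old_bare, new_bare)
--         result.append("'".join(parts))
--     return result
-- ===== SOURCE B (Python) =====
-- def rewrite_ddl_catalog_schema(
--     stmts,
--     source_catalog,
--     source_schema,
--     target_catalog,
--     target_schema,
-- ):
--     """Streaming rewrite: consume quoted literals pairwise with str.partition
--     instead of splitting the whole statement and patching even indices."""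
--     if source_catalog == target_catalog and source_schema == target_schema:
--         return stmts
--     old_prefix = f"`{source_catalog}`.`{source_schema}`"
--     new_prefix = f"`{target_catalog}`.`{target_schema}`"
--     old_bare = f"{source_catalog}.{source_schema}"
--     new_bare = f"{target_catalog}.{target_schema}"
--
--     def fix(seg):
--         return seg.replace(old_prefix, new_prefix).replace(old_bare, new_bare)
--
--     def rewrite(s):
--         out = []
--         while True:
--             head, sep, s = s.partition("'")
--             out.append(fix(head))
--             if not sep:
--                 return "".join(out)
--             lit, sep2, s = s.partition("'")
--             out.append(sep + lit + sep2)
--             if not sep2: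
--                 return "".join(out)
--
--     return [rewrite(s) for s in stmts]
-- ===== Notes on version B (the rewrite author's own statement) =====
-- stated objective: alternative
-- what changed: Per statement, B streams through the string with str.partition, consuming one quoted literal at a time and fixing each unquoted run as it goes, instead of A's split-on-every-quote, patch-even-indices-in-place, rejoin.
import Mathlib
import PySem

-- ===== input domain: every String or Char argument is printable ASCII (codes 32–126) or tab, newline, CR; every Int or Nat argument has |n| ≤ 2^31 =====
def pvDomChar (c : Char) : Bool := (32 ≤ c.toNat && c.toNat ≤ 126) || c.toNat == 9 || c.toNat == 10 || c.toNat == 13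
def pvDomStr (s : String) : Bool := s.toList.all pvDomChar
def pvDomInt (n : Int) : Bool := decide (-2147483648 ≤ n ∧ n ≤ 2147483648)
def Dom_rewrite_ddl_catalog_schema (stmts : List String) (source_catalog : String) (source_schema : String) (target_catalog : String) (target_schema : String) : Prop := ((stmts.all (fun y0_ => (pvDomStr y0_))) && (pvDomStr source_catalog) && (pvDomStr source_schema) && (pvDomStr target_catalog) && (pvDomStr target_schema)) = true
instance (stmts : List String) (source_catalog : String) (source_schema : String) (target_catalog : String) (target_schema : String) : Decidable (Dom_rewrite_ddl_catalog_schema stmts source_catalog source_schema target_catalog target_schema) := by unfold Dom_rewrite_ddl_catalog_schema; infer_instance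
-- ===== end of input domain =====

-- B rewrites each statement in one streaming pass over quote-delimited segments
-- (str.partition consuming one quoted literal at a time) instead of A's
-- split-on-all-quotes / patch-even-indices / join; same return value, similar cost.

-- ===== PORT A =====
-- Port of A. Indices produced by range(0, len(parts), 2) are always in range,
-- so plain List.getD / List.set are exact for parts[i] read/write here.
def rewrite_ddl_catalog_schema (stmts : List String) (source_catalog : String) (source_schema : String) (target_catalog : String) (target_schema : String) : List String :=
  if source_catalog == target_catalog && source_schema == target_schema then stmts
  else
    let old_prefix := '`' :: source_catalog.toList ++ '`' :: '.' :: '`' :: source_schema.toList ++ ['`']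
    let new_prefix := '`' :: target_catalog.toList ++ '`' :: '.' :: '`' :: target_schema.toList ++ ['`']
    let old_bare := source_catalog.toList ++ '.' :: source_schema.toList
    let new_bare := target_catalog.toList ++ '.' :: target_schema.toList
    stmts.foldl (fun result s =>
      let parts := PySem.Chars.splitOn s.toList ['\'']
      let parts := (PySem.List.pyRange 0 (parts.length : Int) 2).foldl
        (fun ps i => ps.set i.toNat
          (PySem.Chars.replace (PySem.Chars.replace (ps.getD i.toNat []) old_prefix new_prefix) old_bare new_bare))
        parts
      result ++ [String.mk (PySem.Chars.join ['\''] parts)]) []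

-- ===== PORT B =====
-- fix(seg) of Source B
def pvFixB (op np ob nb seg : List Char) : List Char :=
  PySem.Chars.replace (PySem.Chars.replace seg op np) ob nb

-- hand port of s.partition("'") (PySem has no partition): returns
-- (part before first quote, whether a quote was found, part after it); exact,
-- with the middle component "'" encoded as the Bool `true` and "" as `false`.
def pvPartQuote : List Char → List Char × Bool × List Char
  | [] => ([], false, [])
  | c :: cs =>
    if c = '\'' then ([], true, cs)
    else
      let r := pvPartQuote cs
      (c :: r.1, r.2.1, r.2.2)

theorem pvPartQuote_found_len : ∀ (s h t : List Char), pvPartQuote s = (h, true, t) → t.length < s.length := by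
  intro s
  induction s with
  | nil => intro h t he; simp [pvPartQuote] at he
  | cons c cs ih =>
    intro h t he
    by_cases hc : c = '\''
    · rw [pvPartQuote, if_pos hc] at he
      cases he
      simp
    · rw [pvPartQuote, if_neg hc] at he
      have h21 : (pvPartQuote cs).2.1 = true := by
        have := congrArg (fun p => p.2.1) he; simpa using this
      have h22 : (pvPartQuote cs).2.2 = t := by
        have := congrArg (fun p => p.2.2) he; simpa using this
      have := ih (pvPartQuote cs).1 t (by rw [← h22, ← h21])
      simp only [List.length_cons]; omega

-- the while-loop of Source B's rewrite(s): out is the accumulated `out` list;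
-- "if not sep" / "if not sep2" are the two dite conditions
def pvRewriteLoop (op np ob nb : List Char) (s : List Char) (out : List (List Char)) : List Char :=
  let p1 := pvPartQuote s
  let out1 := out ++ [pvFixB op np ob nb p1.1]
  if h1 : p1.2.1 = false then PySem.Chars.join [] out1
  else
    let p2 := pvPartQuote p1.2.2
    if h2 : p2.2.1 = false then PySem.Chars.join [] (out1 ++ ['\'' :: p2.1])
    else pvRewriteLoop op np ob nb p2.2.2 (out1 ++ ['\'' :: p2.1 ++ ['\'']])
termination_by s.length
decreasing_by
  have h1' : (pvPartQuote s).2.1 = true := by simpa using h1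
  have h2' : (pvPartQuote (pvPartQuote s).2.2).2.1 = true := by simpa using h2
  have a1 := pvPartQuote_found_len s (pvPartQuote s).1 (pvPartQuote s).2.2 (by rw [← h1'])
  have a2 := pvPartQuote_found_len (pvPartQuote s).2.2 (pvPartQuote (pvPartQuote s).2.2).1
    (pvPartQuote (pvPartQuote s).2.2).2.2 (by rw [← h2'])
  show (pvPartQuote (pvPartQuote s).2.2).2.2.length < s.length
  omega

def rewrite_ddl_catalog_schema_alt (stmts : List String) (source_catalog : String) (source_schema : String) (target_catalog : String) (target_schema : String) : List String :=
  if source_catalog == target_catalog && source_schema == target_schema then stmts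
  else
    let old_prefix := '`' :: source_catalog.toList ++ '`' :: '.' :: '`' :: source_schema.toList ++ ['`']
    let new_prefix := '`' :: target_catalog.toList ++ '`' :: '.' :: '`' :: target_schema.toList ++ ['`']
    let old_bare := source_catalog.toList ++ '.' :: source_schema.toList
    let new_bare := target_catalog.toList ++ '.' :: target_schema.toList
    stmts.map (fun s => String.mk (pvRewriteLoop old_prefix new_prefix old_bare new_bare s.toList []))

-- ===== PRECONDITION & SPEC =====
def Spec_rewrite_ddl_catalog_schema (stmts : List String) (source_catalog : String) (source_schema : String) (target_catalog : String) (target_schema : String) (out : List String) : Prop := out = rewrite_ddl_catalog_schema_alt stmts source_catalog source_schema target_catalog target_schema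
instance (stmts : List String) (source_catalog : String) (source_schema : String) (target_catalog : String) (target_schema : String) (out : List String) : Decidable (Spec_rewrite_ddl_catalog_schema stmts source_catalog source_schema target_catalog target_schema out) := by unfold Spec_rewrite_ddl_catalog_schema; infer_instance

-- ===== CLAIM (what is proved, stated in full; the proofs are below) =====
def Claim_equal_rewrite_ddl_catalog_schema : Prop := ∀ (stmts : List String) (source_catalog : String) (source_schema : String) (target_catalog : String) (target_schema : String), Dom_rewrite_ddl_catalog_schema stmts source_catalog source_schema target_catalog target_schema → Spec_rewrite_ddl_catalog_schema stmts source_catalog source_schema target_catalog target_schema (rewrite_ddl_catalog_schema stmts source_catalog source_schema target_catalog target_schema)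

-- ===== LEMMAS AND PROOFS =====

-- structural version of s.split("'") (PySem.Chars.splitOn is fuel-based)
def pvSp : List Char → List (List Char)
  | [] => [[]]
  | c :: rest => if c = '\'' then [] :: pvSp rest else (pvSp rest).modifyHead (c :: ·)

theorem pvSp_ne_nil : ∀ (s : List Char), pvSp s ≠ [] := by
  intro s
  induction s with
  | nil => simp [pvSp]
  | cons c rest ih =>
    by_cases h : c = '\''
    · simp [pvSp, h]
    · simp only [pvSp, if_neg h]
      cases hx : pvSp rest
      · exact absurd hx ih
      · simp [List.modifyHead]

theorem pvGoSpec : ∀ (fuel : Nat) (l cur : List Char) (acc : List (List Char)), l.length < fuel →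
    PySem.Chars.splitOn.go ['\''] fuel l cur acc = acc.reverse ++ (pvSp l).modifyHead (cur.reverse ++ ·) := by
  intro fuel
  induction fuel with
  | zero => intro l cur acc h; omega
  | succ f ih =>
    intro l cur acc h
    match l with
    | [] => simp [PySem.Chars.splitOn.go, pvSp]
    | c :: rest =>
      by_cases hc : c = '\''
      · subst hc
        rw [PySem.Chars.splitOn.go]
        rw [if_pos (by simp [List.isPrefixOf])]
        have hd : List.drop (['\''] : List Char).length ('\'' :: rest) = rest := by simp
        rw [hd, ih rest [] _ (by simp at h ⊢; omega)]
        simp only [pvSp, if_pos rfl, List.modifyHead, List.reverse_cons, List.length_singleton,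
          List.drop_succ_cons, List.drop_zero, List.reverse_nil, List.nil_append]
        cases hsp : pvSp rest <;> simp
      · rw [PySem.Chars.splitOn.go]
        have hpre : (['\''].isPrefixOf (c :: rest)) = false := by
          simp [List.isPrefixOf]; exact fun hh => absurd hh.symm hc
        rw [if_neg (by simp [hpre])]
        rw [ih rest (c :: cur) acc (by simp at h ⊢; omega)]
        simp only [pvSp, if_neg hc]
        rcases List.exists_cons_of_ne_nil (pvSp_ne_nil rest) with ⟨a, t, hx⟩
        simp [hx, List.modifyHead]

theorem pvSplitOn_eq (cs : List Char) : PySem.Chars.splitOn cs ['\''] = pvSp cs := by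
  rw [PySem.Chars.splitOn, pvGoSpec (cs.length + 1) cs [] [] (by omega)]
  rcases List.exists_cons_of_ne_nil (pvSp_ne_nil cs) with ⟨a, t, hx⟩
  simp [hx, List.modifyHead]

-- even-index in-place map, structurally
def pvAlt (f : List Char → List Char) : List (List Char) → List (List Char)
  | [] => []
  | [x] => [f x]
  | x :: y :: rs => f x :: y :: pvAlt f rs

theorem pvAlt_ne_nil (f : List Char → List Char) (l : List (List Char)) (h : l ≠ []) : pvAlt f l ≠ [] := by
  match l with
  | [] => exact absurd rfl h
  | [x] => simp [pvAlt]
  | x :: y :: rs => simp [pvAlt]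

theorem pvRange2_cons (a b : Int) (h : a < b) :
    PySem.List.pyRange a b 2 = a :: PySem.List.pyRange (a + 2) b 2 := by
  rw [PySem.List.pyRange_of_pos a b (show (0:Int) < 2 by norm_num),
    PySem.List.pyRange_of_pos (a + 2) b (show (0:Int) < 2 by norm_num)]
  by_cases h2 : a + 2 < b
  · rw [if_pos h, if_pos h2]
    have hn : ((b - a + 2 - 1) / 2).toNat = ((b - (a + 2) + 2 - 1) / 2).toNat + 1 := by omega
    rw [hn, List.range_succ_eq_map]
    simp only [List.map_cons, List.map_map, Nat.cast_zero, mul_zero, add_zero]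
    congr 1
    apply List.map_congr_left
    intro k _
    simp only [Function.comp_apply]
    push_cast; ring
  · rw [if_pos h, if_neg h2]
    have hn : ((b - a + 2 - 1) / 2).toNat = 1 := by omega
    rw [hn]
    simp [List.range_succ]

theorem pvFoldlSetEven (f : List Char → List Char) : ∀ (ps pre : List (List Char)),
      (PySem.List.pyRange (pre.length : Int) ((pre.length : Int) + (ps.length : Int)) 2).foldl
        (fun acc i => acc.set i.toNat (f (acc.getD i.toNat []))) (pre ++ ps)
      = pre ++ pvAlt f ps
  | [], pre => by
    rw [PySem.List.pyRange_of_pos _ _ (show (0:Int) < 2 by norm_num)]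
    simp [pvAlt]
  | [x], pre => by
    have h1 : (pre.length : Int) < (pre.length : Int) + (([x] : List (List Char)).length : Int) := by
      simp only [List.length_singleton]; push_cast; omega
    rw [pvRange2_cons _ _ h1, PySem.List.pyRange_of_pos _ _ (show (0:Int) < 2 by norm_num)]
    rw [if_neg (by simp)]
    simp only [List.range_zero, List.map_nil, List.foldl_cons, List.foldl_nil]
    rw [Int.toNat_natCast]
    rw [List.getD_append_right _ _ _ _ (le_refl _), List.set_append_right _ _ (le_refl _)]
    simp [pvAlt]
  | x :: y :: rs, pre => by
    have ih := pvFoldlSetEven f rs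
    have h1 : (pre.length : Int) < (pre.length : Int) + (((x :: y :: rs) : List (List Char)).length : Int) := by
      simp only [List.length_cons]; push_cast; omega
    rw [pvRange2_cons _ _ h1]
    simp only [List.foldl_cons]
    rw [Int.toNat_natCast]
    rw [List.getD_append_right _ _ _ _ (le_refl _), List.set_append_right _ _ (le_refl _)]
    simp only [Nat.sub_self, List.getD_cons_zero, List.set_cons_zero]
    have hre : pre ++ f x :: y :: rs = (pre ++ [f x, y]) ++ rs := by simp
    have hlen : (pre.length : Int) + 2 = (((pre ++ [f x, y]).length : Nat) : Int) := by
      simp only [List.length_append, List.length_cons, List.length_nil]; omega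
    have hlen2 : (pre.length : Int) + (((x :: y :: rs) : List (List Char)).length : Int)
        = (((pre ++ [f x, y]).length : Nat) : Int) + (rs.length : Int) := by
      simp only [List.length_append, List.length_cons, List.length_nil]; omega
    rw [hre, hlen, hlen2, ih (pre ++ [f x, y])]
    simp [pvAlt]

theorem pvJoinNil : ∀ (l : List (List Char)), PySem.Chars.join [] l = l.flatten := by
  intro l
  match l with
  | [] => simp [PySem.Chars.join_nil]
  | [p] => simp [PySem.Chars.join_singleton]
  | p :: q :: rest =>
    rw [PySem.Chars.join_cons_cons, pvJoinNil (q :: rest)]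
    simp

theorem pvJoinConsNe (sep x : List Char) (ys : List (List Char)) (h : ys ≠ []) :
    PySem.Chars.join sep (x :: ys) = x ++ sep ++ PySem.Chars.join sep ys := by
  rcases List.exists_cons_of_ne_nil h with ⟨a, t, hx⟩
  subst hx
  exact PySem.Chars.join_cons_cons sep x a t

theorem pvPart_not_found : ∀ (s : List Char), (pvPartQuote s).2.1 = false → (pvPartQuote s).1 = s ∧ pvSp s = [s] := by
  intro s
  induction s with
  | nil => intro _; simp [pvPartQuote, pvSp]
  | cons c cs ih =>
    intro h
    by_cases hc : c = '\''
    · simp [pvPartQuote, hc] at h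
    · simp only [pvPartQuote, if_neg hc] at h ⊢
      have := ih h
      simp only [pvSp, if_neg hc, this.1, this.2, List.modifyHead]
      simp

theorem pvPart_found : ∀ (s : List Char), (pvPartQuote s).2.1 = true →
    pvSp s = (pvPartQuote s).1 :: pvSp (pvPartQuote s).2.2 := by
  intro s
  induction s with
  | nil => intro h; simp [pvPartQuote] at h
  | cons c cs ih =>
    intro h
    by_cases hc : c = '\''
    · simp [pvPartQuote, pvSp, hc]
    · simp only [pvPartQuote, if_neg hc] at h ⊢
      rw [pvSp, if_neg hc, ih h]
      simp [List.modifyHead]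

theorem pvLoopSpecAux (op np ob nb : List Char) : ∀ (n : Nat) (s : List Char), s.length ≤ n → ∀ (out : List (List Char)),
    pvRewriteLoop op np ob nb s out
      = out.flatten ++ PySem.Chars.join ['\''] (pvAlt (pvFixB op np ob nb) (pvSp s)) := by
  intro n
  induction n with
  | zero =>
    intro s hs out
    have hs0 : s = [] := by cases s with | nil => rfl | cons c cs => simp at hs
    subst hs0
    rw [pvRewriteLoop]
    simp [pvPartQuote, pvSp, pvAlt, pvJoinNil, PySem.Chars.join_singleton]
  | succ n ih =>
    intro s hs out
    by_cases hf : (pvPartQuote s).2.1 = false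
    · have hp := pvPart_not_found s hf
      rw [pvRewriteLoop]
      simp only [hf]
      rw [dif_pos trivial]
      rw [hp.1, hp.2, pvJoinNil]
      simp [pvAlt, PySem.Chars.join_singleton]
    · have hf' : (pvPartQuote s).2.1 = true := by simpa using hf
      have hsp := pvPart_found s hf'
      have a1 := pvPartQuote_found_len s (pvPartQuote s).1 (pvPartQuote s).2.2 (by rw [← hf'])
      by_cases hf2 : (pvPartQuote (pvPartQuote s).2.2).2.1 = false
      · have hp2 := pvPart_not_found (pvPartQuote s).2.2 hf2
        rw [pvRewriteLoop]
        simp only [hf2]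
        rw [dif_neg (by simp [hf']), dif_pos trivial]
        rw [hsp, hp2.2, hp2.1, pvJoinNil]
        simp [pvAlt, PySem.Chars.join_cons_cons, PySem.Chars.join_singleton]
      · have hf2' : (pvPartQuote (pvPartQuote s).2.2).2.1 = true := by simpa using hf2
        have hsp2 := pvPart_found (pvPartQuote s).2.2 hf2'
        have a2 := pvPartQuote_found_len (pvPartQuote s).2.2 (pvPartQuote (pvPartQuote s).2.2).1
          (pvPartQuote (pvPartQuote s).2.2).2.2 (by rw [← hf2'])
        rw [pvRewriteLoop]
        rw [dif_neg (by simp [hf']), dif_neg (by simp [hf2'])]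
        rw [ih _ (by omega)]
        rw [hsp, hsp2]
        have hne := pvAlt_ne_nil (pvFixB op np ob nb) _ (pvSp_ne_nil (pvPartQuote (pvPartQuote s).2.2).2.2)
        simp only [pvAlt]
        rw [pvJoinConsNe _ _ _ (by simp [hne])]
        rw [pvJoinConsNe _ _ _ hne]
        simp

theorem pvLoopSpec (op np ob nb : List Char) (s : List Char) :
    pvRewriteLoop op np ob nb s []
      = PySem.Chars.join ['\''] (pvAlt (pvFixB op np ob nb) (pvSp s)) := by
  simpa using pvLoopSpecAux op np ob nb s.length s (le_refl _) []

theorem pvFoldlSetEven0 (f : List Char → List Char) (ps : List (List Char)) :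
    (PySem.List.pyRange 0 (ps.length : Int) 2).foldl
      (fun acc i => acc.set i.toNat (f (acc.getD i.toNat []))) ps = pvAlt f ps := by
  simpa using pvFoldlSetEven f ps []

theorem pvFoldlSetEvenA (op np ob nb : List Char) (ps : List (List Char)) :
    (PySem.List.pyRange 0 (ps.length : Int) 2).foldl
      (fun acc i => acc.set i.toNat
        (PySem.Chars.replace (PySem.Chars.replace (acc.getD i.toNat []) op np) ob nb)) ps
    = pvAlt (pvFixB op np ob nb) ps :=
  pvFoldlSetEven0 (pvFixB op np ob nb) ps

theorem rewrite_ddl_catalog_schema_spec : Claim_equal_rewrite_ddl_catalog_schema := by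
  intro stmts sc ss tc ts _dom
  unfold Spec_rewrite_ddl_catalog_schema rewrite_ddl_catalog_schema rewrite_ddl_catalog_schema_alt
  by_cases hg : (sc == tc && ss == ts) = true
  · simp [hg]
  · simp only [hg]
    rw [if_neg (by simp [hg]), if_neg (by simp [hg])]
    rw [PySem.List.foldl_append_singleton_eq_map]
    simp only [List.nil_append]
    apply List.map_congr_left
    intro s _
    congr 1
    rw [pvSplitOn_eq, pvFoldlSetEvenA, ← pvLoopSpec]
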